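-- pv_equiv track=rewrite | github.com/narien/AoC2024 | day5/PrintQueue.py | evaluateUpdates
-- ===== SOURCE A (Python) =====
-- def checkPageOrder(page, update, pairs):
--     for value in update:
--         dependencies = [second for first, second in pairs if first in update]
--         if page in dependencies:
--             return False
--     return True
--
-- def checkUpdateOrder(update, pairs):
--     uCopy = update.copy()
--     while uCopy:
--         page = uCopy.pop(0)
--         if not checkPageOrder(page, uCopy, pairs):
--             return False
--     return True
--
-- def customSort(update, pairs):
--     while not checkUpdateOrder(update, pairs):
--         order = {x: i for i, x in enumerate(update)}
--         for first, second in pairs: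
--             if first in order and second in order:
--                 if order[first] > order[second]:
--                     order[first], order[second] = order[second], order[first]
--         update = sorted(update, key=lambda x: order[x])
--     return update
--
-- def fixPageOrder(update, pairs):
--     update = customSort(update, pairs)
--     return update[len(update) // 2]
--
-- def evaluateUpdates(updates, pairs):
--     ValidChecksum = 0
--     fixedChecksum = 0
--     for update in updates:
--         if checkUpdateOrder(update, pairs):
--             ValidChecksum += update[len(update) // 2]
--         else:
--             fixedChecksum += fixPageOrder(update, pairs)
--     return ValidChecksum, fixedChecksum
-- ===== SOURCE B (Python) =====
-- def evaluateUpdates(updates, pairs):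
--     pairset = set(pairs)
--     validChecksum = 0
--     fixedChecksum = 0
--     for update in updates:
--         n = len(update)
--         if all((update[j], update[i]) not in pairset
--                for i in range(n) for j in range(i + 1, n)):
--             validChecksum += update[n // 2]
--         else:
--             fixed = sorted(update, key=lambda x: sum(1 for y in update if (y, x) in pairset))
--             fixedChecksum += fixed[n // 2]
--     return validChecksum, fixedChecksum
-- ===== Notes on version B (the rewrite author's own statement) =====
-- stated objective: faster
-- what changed: Replaces A's pop-and-rescan validity check (which rebuilds a dependency list from the whole rule list for every page of every suffix) by one pass over index pairs against a hash set of rules, and replaces A's iterate-swap-and-resort repair loop by a single sort keyed on the number of in-update predecessors.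
-- outside the precondition, e.g. on evaluateUpdates([[4, 2, 6]], [(1, 5), (2, 1), (6, 2), (4, 3), (2, 4)]): A returns (0, 2), B returns (0, 4); on evaluateUpdates([[1, 2]], [(2, 1), (1, 2)]): A does not finish within the time limit, B returns (0, 2)
import Mathlib
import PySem

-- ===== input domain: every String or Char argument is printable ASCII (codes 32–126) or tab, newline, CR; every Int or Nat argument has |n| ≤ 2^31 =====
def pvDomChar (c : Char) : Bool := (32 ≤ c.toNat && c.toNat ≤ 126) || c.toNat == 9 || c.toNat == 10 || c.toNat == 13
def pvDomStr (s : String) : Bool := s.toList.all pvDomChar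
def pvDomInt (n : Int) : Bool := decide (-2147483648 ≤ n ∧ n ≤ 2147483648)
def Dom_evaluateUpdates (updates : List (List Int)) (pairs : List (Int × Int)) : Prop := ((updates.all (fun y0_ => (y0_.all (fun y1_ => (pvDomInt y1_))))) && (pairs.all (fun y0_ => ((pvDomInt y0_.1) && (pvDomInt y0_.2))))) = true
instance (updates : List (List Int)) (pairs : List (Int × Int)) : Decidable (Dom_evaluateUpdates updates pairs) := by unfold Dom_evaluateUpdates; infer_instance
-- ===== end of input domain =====

-- B replaces A's pop-and-rescan validity check and its iterate-swap-and-resort repair loop by a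
-- single hash-set scan over index pairs and one sort keyed on the number of in-update predecessors
-- (objective: faster).  A's `while` repair loop is ported with a fuel bound that is proved
-- sufficient on Pre_.

-- ===== PORT A =====
def checkPageOrderLoop (page : Int) (update : List Int) (pairs : List (Int × Int)) : List Int → Bool
  | [] => true
  | _ :: rest =>
      if page ∈ (pairs.filter (fun p => decide (p.1 ∈ update))).map (fun p => p.2) then false
      else checkPageOrderLoop page update pairs rest

def checkPageOrder (page : Int) (update : List Int) (pairs : List (Int × Int)) : Bool :=
  checkPageOrderLoop page update pairs update

def checkUpdateOrder : List Int → List (Int × Int) → Bool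
  | [], _ => true
  | page :: rest, pairs =>
      if !(checkPageOrder page rest pairs) then false else checkUpdateOrder rest pairs

-- {x: i for i, x in enumerate(update)}
def initOrder (update : List Int) : PySem.Dict Int Int :=
  (PySem.List.enumerate update 0).foldl (fun d p => d.insert p.2 p.1) PySem.Dict.empty

-- body of 'for first, second in pairs: …' (simultaneous assignment: both right-hand sides read first)
def swapStep (d : PySem.Dict Int Int) (p : Int × Int) : PySem.Dict Int Int :=
  if d.contains p.1 && d.contains p.2 then
    if d.getD p.1 0 > d.getD p.2 0 then
      (d.insert p.1 (d.getD p.2 0)).insert p.2 (d.getD p.1 0)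
    else d
  else d

-- one iteration of the body of A's 'while not checkUpdateOrder(update, pairs)' loop
def sortPass (update : List Int) (pairs : List (Int × Int)) : List Int :=
  let order := pairs.foldl swapStep (initOrder update)
  PySem.List.sorted update (fun x => order.getD x 0) false

def customSortLoop (pairs : List (Int × Int)) : Nat → List Int → List Int
  | 0, update => update
  | fuel + 1, update =>
      if checkUpdateOrder update pairs then update
      else customSortLoop pairs fuel (sortPass update pairs)

-- fuel n²+1 is proved sufficient under Pre_ (the violation count is < n² and strictly decreases)
def customSort (update : List Int) (pairs : List (Int × Int)) : List Int :=
  customSortLoop pairs (update.length * update.length + 1) update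

def fixPageOrder (update : List Int) (pairs : List (Int × Int)) : Int :=
  let u := customSort update pairs
  PySem.List.pyGetD u (PySem.Int.floordiv (PySem.List.len u) 2) 0

def evaluateUpdates (updates : List (List Int)) (pairs : List (Int × Int)) : Int × Int :=
  updates.foldl
    (fun acc update =>
      if checkUpdateOrder update pairs then
        (acc.1 + PySem.List.pyGetD update (PySem.Int.floordiv (PySem.List.len update) 2) 0, acc.2)
      else
        (acc.1, acc.2 + fixPageOrder update pairs))
    (0, 0)

-- ===== PORT B =====
-- all((update[j], update[i]) not in pairset for i in range(n) for j in range(i+1, n))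
def altValid (update : List Int) (pairset : PySem.Set (Int × Int)) : Bool :=
  (PySem.List.pyRange 0 (PySem.List.len update) 1).all (fun i =>
    (PySem.List.pyRange (i + 1) (PySem.List.len update) 1).all (fun j =>
      !(pairset.contains (PySem.List.pyGetD update j 0, PySem.List.pyGetD update i 0))))

-- lambda x: sum(1 for y in update if (y, x) in pairset)
def altKey (update : List Int) (pairset : PySem.Set (Int × Int)) (x : Int) : Int :=
  update.foldl (fun acc y => if pairset.contains (y, x) then acc + 1 else acc) 0

def evaluateUpdates_alt (updates : List (List Int)) (pairs : List (Int × Int)) : Int × Int :=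
  let pairset : PySem.Set (Int × Int) := PySem.Set.ofList pairs
  updates.foldl
    (fun acc update =>
      if altValid update pairset then
        (acc.1 + PySem.List.pyGetD update (PySem.Int.floordiv (PySem.List.len update) 2) 0, acc.2)
      else
        let fixed := PySem.List.sorted update (altKey update pairset) false
        (acc.1, acc.2 + PySem.List.pyGetD fixed (PySem.Int.floordiv (PySem.List.len fixed) 2) 0))
    (0, 0)

-- ===== PRECONDITION & SPEC =====
-- Pre_ excludes updates that are empty (A raises IndexError taking their middle page) and
-- mis-ordered updates on which the page rules do not restrict to a strict total order of the
-- update's (then necessarily distinct) pages: there A's repair loop can diverge, and where it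
-- happens to terminate its result is accidental (AoC guarantees the total-order shape).
def Pre_evaluateUpdates (updates : List (List Int)) (pairs : List (Int × Int)) : Prop :=
  ∀ u ∈ updates, u ≠ [] ∧
    (¬ (∀ i ∈ List.range u.length, ∀ j ∈ List.range u.length, i < j → (u[j]?.getD 0, u[i]?.getD 0) ∉ pairs) →
      u.Nodup ∧ (∀ x ∈ u, (x, x) ∉ pairs) ∧
        (∀ x ∈ u, ∀ y ∈ u, x ≠ y → ((x, y) ∈ pairs ↔ (y, x) ∉ pairs)) ∧
        (∀ x ∈ u, ∀ y ∈ u, ∀ z ∈ u, (x, y) ∈ pairs → (y, z) ∈ pairs → (x, z) ∈ pairs))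
instance (updates : List (List Int)) (pairs : List (Int × Int)) : Decidable (Pre_evaluateUpdates updates pairs) := by
  unfold Pre_evaluateUpdates; infer_instance

def pvWitness_evaluateUpdates : List (List Int) × (List (Int × Int)) :=
  ([[2, 1], [1, 2]], [(1, 2)])

def Spec_evaluateUpdates (updates : List (List Int)) (pairs : List (Int × Int)) (out : Int × Int) : Prop := out = evaluateUpdates_alt updates pairs
instance (updates : List (List Int)) (pairs : List (Int × Int)) (out : Int × Int) : Decidable (Spec_evaluateUpdates updates pairs out) := by unfold Spec_evaluateUpdates; infer_instance

-- ===== CLAIM (what is proved, stated in full; the proofs are below) =====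
def Claim_equal_evaluateUpdates : Prop := ∀ (updates : List (List Int)) (pairs : List (Int × Int)), Dom_evaluateUpdates updates pairs → Pre_evaluateUpdates updates pairs → Spec_evaluateUpdates updates pairs (evaluateUpdates updates pairs)

-- ===== LEMMAS AND PROOFS =====

-- the validity predicate both programs decide: no listed rule (b, a) with a placed before b
def NoViol (pairs : List (Int × Int)) (u : List Int) : Prop :=
  u.Pairwise (fun a b => (b, a) ∉ pairs)

lemma noViol_getElem (pairs : List (Int × Int)) (u : List Int) :
    NoViol pairs u ↔
      ∀ i ∈ List.range u.length, ∀ j ∈ List.range u.length, i < j →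
        (u[j]?.getD 0, u[i]?.getD 0) ∉ pairs := by
  unfold NoViol
  rw [List.pairwise_iff_getElem]
  simp only [List.mem_range]
  constructor
  · intro h i hi j hj hij
    rw [List.getElem?_eq_getElem hi, List.getElem?_eq_getElem hj, Option.getD_some,
      Option.getD_some]
    exact h i j hi hj hij
  · intro h i j hi hj hij
    have := h i hi j hj hij
    rwa [List.getElem?_eq_getElem hi, List.getElem?_eq_getElem hj, Option.getD_some,
      Option.getD_some] at this

-- order axioms Pre_ guarantees on a mis-ordered update (stated purely by membership)
def OrdAx (u : List Int) (pairs : List (Int × Int)) : Prop :=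
  u.Nodup ∧ (∀ x ∈ u, (x, x) ∉ pairs) ∧
    (∀ x ∈ u, ∀ y ∈ u, x ≠ y → ((x, y) ∈ pairs ↔ (y, x) ∉ pairs)) ∧
    (∀ x ∈ u, ∀ y ∈ u, ∀ z ∈ u, (x, y) ∈ pairs → (y, z) ∈ pairs → (x, z) ∈ pairs)

lemma OrdAx_perm {u v : List Int} {pairs : List (Int × Int)} (h : OrdAx u pairs)
    (hp : v.Perm u) : OrdAx v pairs := by
  obtain ⟨h1, h2, h3, h4⟩ := h
  exact ⟨hp.symm.nodup h1,
    fun x hx => h2 x (hp.mem_iff.mp hx),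
    fun x hx y hy => h3 x (hp.mem_iff.mp hx) y (hp.mem_iff.mp hy),
    fun x hx y hy z hz => h4 x (hp.mem_iff.mp hx) y (hp.mem_iff.mp hy) z (hp.mem_iff.mp hz)⟩

-- ---- the two validity checks decide NoViol ----

lemma checkPageOrderLoop_eq (page : Int) (u : List Int) (pairs : List (Int × Int)) :
    ∀ l : List Int, checkPageOrderLoop page u pairs l = true ↔
      (l = [] ∨ page ∉ (pairs.filter (fun p => decide (p.1 ∈ u))).map (fun p => p.2)) := by
  intro l
  induction l with
  | nil => simp [checkPageOrderLoop]
  | cons a t ih =>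
      by_cases hc : page ∈ (pairs.filter (fun p => decide (p.1 ∈ u))).map (fun p => p.2)
      · simp [checkPageOrderLoop, hc]
      · simp only [checkPageOrderLoop, if_neg hc, ih]
        simp [hc]

lemma checkPageOrder_iff (page : Int) (u : List Int) (pairs : List (Int × Int)) :
    checkPageOrder page u pairs = true ↔ ∀ y ∈ u, (y, page) ∉ pairs := by
  have hc : (page ∈ (pairs.filter (fun p => decide (p.1 ∈ u))).map (fun p => p.2)) ↔
      ∃ y ∈ u, (y, page) ∈ pairs := by
    simp only [List.mem_map, List.mem_filter, decide_eq_true_eq]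
    constructor
    · rintro ⟨⟨y, q⟩, ⟨hp, hy⟩, rfl⟩; exact ⟨y, hy, hp⟩
    · rintro ⟨y, hy, hp⟩; exact ⟨(y, page), ⟨hp, hy⟩, rfl⟩
  unfold checkPageOrder
  rw [checkPageOrderLoop_eq]
  cases u with
  | nil => simp
  | cons a t =>
      rw [hc]
      simp

lemma checkUpdateOrder_iff (u : List Int) (pairs : List (Int × Int)) :
    checkUpdateOrder u pairs = true ↔ NoViol pairs u := by
  induction u with
  | nil => simp [checkUpdateOrder, NoViol]
  | cons a t ih =>
      unfold NoViol
      rw [List.pairwise_cons]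
      by_cases hp : checkPageOrder a t pairs = true
      · have h1 := (checkPageOrder_iff a t pairs).mp hp
        simp only [checkUpdateOrder, hp, Bool.not_true, Bool.false_eq_true, if_false, ih]
        unfold NoViol
        constructor
        · exact fun h => ⟨fun b hb => h1 b hb, h⟩
        · exact fun h => h.2
      · have h1 : ¬ ∀ y ∈ t, (y, a) ∉ pairs := fun h => hp ((checkPageOrder_iff a t pairs).mpr h)
        simp only [checkUpdateOrder, Bool.not_eq_true] at hp ⊢
        simp only [hp, Bool.not_false, if_true]
        constructor
        · intro h; exact absurd h (by simp)
        · intro h; exact absurd h.1 h1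

lemma altValid_iff (u : List Int) (pairs : List (Int × Int)) :
    altValid u (PySem.Set.ofList pairs) = true ↔ NoViol pairs u := by
  have hmem : ∀ q : Int × Int, (PySem.Set.ofList pairs).contains q = false ↔ q ∉ pairs := by
    intro q
    rw [← Bool.not_eq_true, PySem.Set.contains]
    simp [PySem.Set.mem_ofList]
  unfold altValid NoViol
  simp only [List.all_eq_true, PySem.List.mem_pyRange_one, Bool.not_eq_true',
    PySem.List.len_eq, hmem]
  rw [List.pairwise_iff_getElem]
  constructor
  · intro h i j hi hj hij
    have h1 := h (i : Int) ⟨by omega, by omega⟩ (j : Int) ⟨by omega, by omega⟩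
    rwa [PySem.List.pyGetD_natCast, PySem.List.pyGetD_natCast, List.getD_eq_getElem _ _ hj,
      List.getD_eq_getElem _ _ hi] at h1
  · intro h i hi j hj
    rw [PySem.List.pyGetD_eq_getElem (xs := u) (d := 0) (i := j) (by omega) (by omega),
      PySem.List.pyGetD_eq_getElem (xs := u) (d := 0) (i := i) (by omega) (by omega)]
    exact h i.toNat j.toNat (by omega) (by omega) (by omega)

lemma check_eq_altValid (u : List Int) (pairs : List (Int × Int)) :
    checkUpdateOrder u pairs = altValid u (PySem.Set.ofList pairs) := by
  exact Bool.coe_iff_coe.mp ((checkUpdateOrder_iff u pairs).trans (altValid_iff u pairs).symm)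

-- ---- the violation-count measure ----

def Vf (pairs : List (Int × Int)) (E : Finset Int) (pos : Int → Int) : Nat :=
  ((E ×ˢ E).filter (fun p => p ∈ pairs ∧ pos p.2 < pos p.1)).card

-- abstract view of one swapStep on the position table
def stepP (u : List Int) (pos : Int → Int) (p : Int × Int) : Int → Int :=
  if p.1 ∈ u ∧ p.2 ∈ u ∧ pos p.2 < pos p.1 then
    fun x => if x = p.1 then pos p.2 else if x = p.2 then pos p.1 else pos x
  else pos

def M (pairs : List (Int × Int)) (v : List Int) : Nat :=
  Vf pairs v.toFinset (fun x => (initOrder v).getD x 0)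

-- ---- initOrder ----

lemma initOrder_items (u : List Int) (h : u.Nodup) :
    (initOrder u).items = (PySem.List.enumerate u 0).map (fun p => (p.2, p.1)) := by
  unfold initOrder
  have := PySem.Dict.items_foldl_insert_fresh (PySem.List.enumerate u 0)
    (fun p => p.2) (fun p => p.1) PySem.Dict.empty
    (fun a _ => PySem.Dict.contains_empty _)
    (by rw [PySem.List.map_snd_enumerate]; exact h)
  simpa using this

lemma initOrder_keys (u : List Int) (h : u.Nodup) : (initOrder u).keys = u := by
  simp only [PySem.Dict.keys, initOrder_items u h, List.map_map]
  have : ((fun p : Int × Int => p.1) ∘ (fun p : Int × Int => (p.2, p.1))) =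
      (fun p : Int × Int => p.2) := rfl
  rw [this, PySem.List.map_snd_enumerate]

lemma initOrder_nodup_keys (u : List Int) : (initOrder u).keys.Nodup := by
  unfold initOrder
  exact PySem.Dict.nodup_keys_foldl_insert_key (PySem.List.enumerate u 0)
    (fun p => p.2) (fun _ p => p.1) PySem.Dict.empty PySem.Dict.nodup_keys_empty

lemma initOrder_getD (u : List Int) (h : u.Nodup) (i : Nat) (hi : i < u.length) :
    (initOrder u).getD u[i] 0 = (i : Int) := by
  apply PySem.Dict.getD_of_mem_items
  · rw [initOrder_items u h, List.mem_map]
    refine ⟨((i : Int), u[i]), ?_, rfl⟩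
    rw [PySem.List.mem_enumerate_iff]
    exact ⟨i, hi, by simp⟩
  · exact initOrder_nodup_keys u

lemma initOrder_pairwise (u : List Int) (h : u.Nodup) :
    u.Pairwise (fun a b => (initOrder u).getD a 0 < (initOrder u).getD b 0) := by
  rw [List.pairwise_iff_getElem]
  intro i j hi hj hij
  rw [initOrder_getD u h i hi, initOrder_getD u h j hj]
  exact_mod_cast hij

-- ---- generic order facts ----

lemma injOn_of_pairwise_lt {u : List Int} {pos : Int → Int}
    (h : u.Pairwise (fun a b => pos a < pos b)) :
    Set.InjOn pos ↑u.toFinset := by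
  intro x hx y hy hxy
  by_contra hne
  have hsym : Symmetric (fun a b : Int => pos a = pos b → a = b) := by
    intro a b hab hba; exact (hab hba.symm).symm
  have h' : u.Pairwise (fun a b => pos a = pos b → a = b) :=
    h.imp (fun hlt heq => absurd heq (ne_of_lt hlt))
  have hx' : x ∈ u := by simpa using hx
  have hy' : y ∈ u := by simpa using hy
  exact hne (List.Pairwise.forall hsym h' hx' hy' hne hxy)

lemma Vf_congr {pairs : List (Int × Int)} {E : Finset Int} {pos1 pos2 : Int → Int}
    (h : ∀ x ∈ E, ∀ y ∈ E, (pos1 x < pos1 y ↔ pos2 x < pos2 y)) :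
    Vf pairs E pos1 = Vf pairs E pos2 := by
  unfold Vf
  congr 1
  apply Finset.filter_congr
  intro p hp
  rw [Finset.mem_product] at hp
  exact and_congr_right fun _ => h p.2 hp.2 p.1 hp.1

lemma Vf_le (pairs : List (Int × Int)) (E : Finset Int) (pos : Int → Int) :
    Vf pairs E pos ≤ E.card * E.card := by
  unfold Vf
  calc _ ≤ (E ×ˢ E).card := Finset.card_filter_le _ _
    _ = E.card * E.card := Finset.card_product E E

-- ---- the key combinatorial fact: a swap of a violated rule strictly decreases Vf ----

lemma swap_dec (pairs : List (Int × Int)) (E : Finset Int) (pos : Int → Int) (f s : Int)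
    (hto : ∀ x ∈ E, ∀ y ∈ E, x ≠ y → ((x, y) ∈ pairs ↔ (y, x) ∉ pairs))
    (htr : ∀ x ∈ E, ∀ y ∈ E, ∀ z ∈ E, (x, y) ∈ pairs → (y, z) ∈ pairs → (x, z) ∈ pairs)
    (hf : f ∈ E) (hs : s ∈ E) (hR : (f, s) ∈ pairs) (hlt : pos s < pos f) :
    Vf pairs E (fun x => if x = f then pos s else if x = s then pos f else pos x) < Vf pairs E pos := by
  have hfs : f ≠ s := by intro h; rw [h] at hlt; exact lt_irrefl _ hlt
  have hnsf : (s, f) ∉ pairs := (hto f hf s hs hfs).mp hR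
  unfold Vf
  set pos' := fun x => if x = f then pos s else if x = s then pos f else pos x with hpos'
  set A := (E ×ˢ E).filter (fun p => p ∈ pairs ∧ pos' p.2 < pos' p.1) with hA
  set B := (E ×ˢ E).filter (fun p => p ∈ pairs ∧ pos p.2 < pos p.1) with hB
  have hmemB : (f, s) ∈ B := by
    rw [hB, Finset.mem_filter, Finset.mem_product]; exact ⟨⟨hf, hs⟩, hR, hlt⟩
  set φ : Int × Int → Int × Int := fun p =>
    if p.1 = s ∧ ¬(pos p.2 < pos s) then (f, p.2)
    else if p.2 = f ∧ ¬(pos f < pos p.1) then (p.1, s) else p with hφ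
  set ψ : Int × Int → Int × Int := fun r =>
    if r.1 = f ∧ ¬(pos r.2 < pos s) then (s, r.2)
    else if r.2 = s ∧ ¬(pos f < pos r.1) then (r.1, f) else r with hψ
  have hmemA : ∀ a b : Int, (a, b) ∈ A ↔ (a ∈ E ∧ b ∈ E) ∧ (a, b) ∈ pairs ∧ pos' b < pos' a := by
    intro a b; rw [hA, Finset.mem_filter, Finset.mem_product]
  have hmemB' : ∀ a b : Int, (a, b) ∈ B ↔ (a ∈ E ∧ b ∈ E) ∧ (a, b) ∈ pairs ∧ pos b < pos a := by
    intro a b; rw [hB, Finset.mem_filter, Finset.mem_product]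
  have hpos'f : pos' f = pos s := by simp [hpos']
  have hpos's : pos' s = pos f := by simp [hpos', hfs.symm]
  have hpos'o : ∀ x, x ≠ f → x ≠ s → pos' x = pos x := by
    intro x h1 h2; simp [hpos', h1, h2]
  have hmapsto : ∀ p ∈ A, φ p ∈ B.erase (f, s) := by
    rintro ⟨a, b⟩ hp
    rw [hmemA] at hp
    obtain ⟨⟨ha, hb⟩, hpr, hvp⟩ := hp
    rw [Finset.mem_erase]
    by_cases haf : a = f
    · rw [haf] at ha hpr hvp ⊢
      by_cases hbf : b = f
      · rw [hbf] at hb hpr hvp ⊢; exact absurd hvp (lt_irrefl _)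
      · by_cases hbs : b = s
        · rw [hbs] at hb hpr hvp ⊢; rw [hpos's, hpos'f] at hvp; omega
        · -- a = f, b ∉ {f, s} : identity, pos b < pos s
          rw [hpos'o b hbf hbs, hpos'f] at hvp
          have hid : φ (f, b) = (f, b) := by
            rw [hφ]; simp only
            rw [if_neg (by rintro ⟨h1, -⟩; exact hfs h1), if_neg (by rintro ⟨h1, -⟩; exact hbf h1)]
          rw [hid]
          refine ⟨by simp [hbs], ?_⟩
          rw [hmemB']
          exact ⟨⟨hf, hb⟩, hpr, by omega⟩
    · by_cases has : a = s
      · rw [has] at ha hpr hvp ⊢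
        by_cases hbf : b = f
        · rw [hbf] at hb hpr hvp ⊢; exact absurd hpr hnsf
        · by_cases hbs : b = s
          · rw [hbs] at hb hpr hvp ⊢; exact absurd hvp (lt_irrefl _)
          · -- a = s, b ∉ {f, s} : pos b < pos f
            rw [hpos'o b hbf hbs, hpos's] at hvp
            by_cases hps : pos b < pos s
            · have hid : φ (s, b) = (s, b) := by
                rw [hφ]; simp only
                rw [if_neg (by rintro ⟨-, h2⟩; exact h2 hps),
                  if_neg (by rintro ⟨h1, -⟩; exact hbf h1)]
              rw [hid]
              refine ⟨by simp [hfs.symm], ?_⟩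
              rw [hmemB']
              exact ⟨⟨hs, hb⟩, hpr, hps⟩
            · have hbr : φ (s, b) = (f, b) := by
                rw [hφ]; simp only
                rw [if_pos ⟨by trivial, hps⟩]
              rw [hbr]
              refine ⟨by simp [hbs], ?_⟩
              rw [hmemB']
              exact ⟨⟨hf, hb⟩, htr f hf s hs b hb hR hpr, hvp⟩
      · by_cases hbf : b = f
        · rw [hbf] at hb hpr hvp ⊢
          -- b = f, a ∉ {f, s} : pos s < pos a
          rw [hpos'o a haf has, hpos'f] at hvp
          by_cases hpf : pos f < pos a
          · have hid : φ (a, f) = (a, f) := by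
              rw [hφ]; simp only
              rw [if_neg (by rintro ⟨h1, -⟩; exact has h1),
                if_neg (by rintro ⟨-, h2⟩; exact h2 hpf)]
            rw [hid]
            refine ⟨by simp [hfs], ?_⟩
            rw [hmemB']
            exact ⟨⟨ha, hf⟩, hpr, hpf⟩
          · have hbr : φ (a, f) = (a, s) := by
              rw [hφ]; simp only
              rw [if_neg (by rintro ⟨h1, -⟩; exact has h1), if_pos ⟨by trivial, hpf⟩]
            rw [hbr]
            refine ⟨by simp [haf], ?_⟩
            rw [hmemB']
            exact ⟨⟨ha, hs⟩, htr a ha f hf s hs hpr hR, hvp⟩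
        · by_cases hbs : b = s
          · rw [hbs] at hb hpr hvp ⊢
            -- b = s, a ∉ {f, s} : pos f < pos a
            rw [hpos'o a haf has, hpos's] at hvp
            have hid : φ (a, s) = (a, s) := by
              rw [hφ]; simp only
              rw [if_neg (by rintro ⟨h1, -⟩; exact has h1),
                if_neg (by rintro ⟨h1, -⟩; exact hfs h1.symm)]
            rw [hid]
            refine ⟨by simp [haf], ?_⟩
            rw [hmemB']
            exact ⟨⟨ha, hs⟩, hpr, by omega⟩
          · -- generic
            rw [hpos'o a haf has, hpos'o b hbf hbs] at hvp
            have hid : φ (a, b) = (a, b) := by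
              rw [hφ]; simp only
              rw [if_neg (by rintro ⟨h1, -⟩; exact has h1),
                if_neg (by rintro ⟨h1, -⟩; exact hbf h1)]
            rw [hid]
            refine ⟨by simp [haf], ?_⟩
            rw [hmemB']
            exact ⟨⟨ha, hb⟩, hpr, hvp⟩
  have hretr : ∀ p ∈ A, ψ (φ p) = p := by
    rintro ⟨a, b⟩ hp
    rw [hmemA] at hp
    obtain ⟨⟨ha, hb⟩, hpr, hvp⟩ := hp
    by_cases haf : a = f
    · rw [haf] at ha hpr hvp ⊢
      by_cases hbf : b = f
      · exact absurd hvp (by rw [hbf]; exact lt_irrefl _)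
      · by_cases hbs : b = s
        · rw [hbs] at hb hpr hvp ⊢; rw [hpos's, hpos'f] at hvp; omega
        · rw [hpos'o b hbf hbs, hpos'f] at hvp
          have hid : φ (f, b) = (f, b) := by
            rw [hφ]; simp only
            rw [if_neg (by rintro ⟨h1, -⟩; exact hfs h1), if_neg (by rintro ⟨h1, -⟩; exact hbf h1)]
          rw [hid, hψ]; simp only
          rw [if_neg (by rintro ⟨-, h2⟩; exact h2 (by omega)),
            if_neg (by rintro ⟨h1, -⟩; exact hbs h1)]
    · by_cases has : a = s
      · rw [has] at ha hpr hvp ⊢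
        by_cases hbf : b = f
        · rw [hbf] at hb hpr hvp ⊢; exact absurd hpr hnsf
        · by_cases hbs : b = s
          · exact absurd hvp (by rw [hbs]; exact lt_irrefl _)
          · rw [hpos'o b hbf hbs, hpos's] at hvp
            by_cases hps : pos b < pos s
            · have hid : φ (s, b) = (s, b) := by
                rw [hφ]; simp only
                rw [if_neg (by rintro ⟨-, h2⟩; exact h2 hps),
                  if_neg (by rintro ⟨h1, -⟩; exact hbf h1)]
              rw [hid, hψ]; simp only
              rw [if_neg (by rintro ⟨h1, -⟩; exact hfs h1.symm),
                if_neg (by rintro ⟨h1, -⟩; exact hbs h1)]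
            · have hbr : φ (s, b) = (f, b) := by
                rw [hφ]; simp only; rw [if_pos ⟨by trivial, hps⟩]
              rw [hbr, hψ]; simp only
              rw [if_pos ⟨by trivial, hps⟩]
      · by_cases hbf : b = f
        · rw [hbf] at hb hpr hvp ⊢
          rw [hpos'o a haf has, hpos'f] at hvp
          by_cases hpf : pos f < pos a
          · have hid : φ (a, f) = (a, f) := by
              rw [hφ]; simp only
              rw [if_neg (by rintro ⟨h1, -⟩; exact has h1),
                if_neg (by rintro ⟨-, h2⟩; exact h2 hpf)]
            rw [hid, hψ]; simp only
            rw [if_neg (by rintro ⟨h1, -⟩; exact haf h1),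
              if_neg (by rintro ⟨h1, -⟩; exact hfs h1)]
          · have hbr : φ (a, f) = (a, s) := by
              rw [hφ]; simp only
              rw [if_neg (by rintro ⟨h1, -⟩; exact has h1), if_pos ⟨by trivial, hpf⟩]
            rw [hbr, hψ]; simp only
            rw [if_neg (by rintro ⟨h1, -⟩; exact haf h1), if_pos ⟨by trivial, hpf⟩]
        · by_cases hbs : b = s
          · rw [hbs] at hb hpr hvp ⊢
            rw [hpos'o a haf has, hpos's] at hvp
            have hid : φ (a, s) = (a, s) := by
              rw [hφ]; simp only
              rw [if_neg (by rintro ⟨h1, -⟩; exact has h1),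
                if_neg (by rintro ⟨h1, -⟩; exact hfs h1.symm)]
            rw [hid, hψ]; simp only
            rw [if_neg (by rintro ⟨h1, -⟩; exact haf h1),
              if_neg (by rintro ⟨-, h2⟩; exact h2 hvp)]
          · rw [hpos'o a haf has, hpos'o b hbf hbs] at hvp
            have hid : φ (a, b) = (a, b) := by
              rw [hφ]; simp only
              rw [if_neg (by rintro ⟨h1, -⟩; exact has h1),
                if_neg (by rintro ⟨h1, -⟩; exact hbf h1)]
            rw [hid, hψ]; simp only
            rw [if_neg (by rintro ⟨h1, -⟩; exact haf h1),
              if_neg (by rintro ⟨h1, -⟩; exact hbs h1)]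
  have hinj : Set.InjOn φ ↑A := by
    intro p hp q hq heq
    rw [← hretr p (by simpa using hp), ← hretr q (by simpa using hq), heq]
  calc A.card ≤ (B.erase (f, s)).card :=
        Finset.card_le_card_of_injOn φ (fun p hp => hmapsto p (by simpa using hp)) hinj
    _ < B.card := Finset.card_lt_card (Finset.erase_ssubset hmemB)

lemma injOn_swap {pos : Int → Int} {f s : Int} {S : Set Int}
    (h : Set.InjOn pos S) (hf : f ∈ S) (hs : s ∈ S) :
    Set.InjOn (fun x => if x = f then pos s else if x = s then pos f else pos x) S := by
  intro x hx y hy hxy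
  simp only at hxy
  have hτ : ∀ z, (if z = f then pos s else if z = s then pos f else pos z) =
      pos (if z = f then s else if z = s then f else z) := by
    intro z
    by_cases h1 : z = f
    · simp [h1]
    · by_cases h2 : z = s
      · have h3 : ¬(s = f) := fun hh => h1 (h2.trans hh)
        simp [h2, h3]
      · simp [h1, h2]
  have hmem : ∀ z, z ∈ S → (if z = f then s else if z = s then f else z) ∈ S := by
    intro z hz
    by_cases h1 : z = f
    · simpa [h1] using hs
    · by_cases h2 : z = s
      · have h3 : ¬(s = f) := fun hh => h1 (h2.trans hh)
        simpa [h1, h2, h3] using hf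
      · simpa [h1, h2] using hz
  have hinv : ∀ z, (if (if z = f then s else if z = s then f else z) = f then s
      else if (if z = f then s else if z = s then f else z) = s then f
      else (if z = f then s else if z = s then f else z)) = z := by
    intro z
    by_cases h1 : z = f
    · by_cases h3 : s = f <;> simp [h1, h3]
    · by_cases h2 : z = s <;> simp [h1, h2]
  rw [hτ x, hτ y] at hxy
  have heq := h (hmem x hx) (hmem y hy) hxy
  have h2 := congrArg (fun z => if z = f then s else if z = s then f else z) heq
  simp only at h2
  rw [hinv x, hinv y] at h2
  exact h2

-- ---- the fold over all rules ----

lemma foldP_dec (u : List Int) (pairs : List (Int × Int))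
    (hto : ∀ x ∈ u.toFinset, ∀ y ∈ u.toFinset, x ≠ y → ((x, y) ∈ pairs ↔ (y, x) ∉ pairs))
    (htr : ∀ x ∈ u.toFinset, ∀ y ∈ u.toFinset, ∀ z ∈ u.toFinset, (x, y) ∈ pairs → (y, z) ∈ pairs → (x, z) ∈ pairs) :
    ∀ (l : List (Int × Int)), (∀ p ∈ l, p ∈ pairs) → ∀ (pos : Int → Int), Set.InjOn pos ↑u.toFinset →
      Set.InjOn (l.foldl (stepP u) pos) ↑u.toFinset ∧
      ((l.foldl (stepP u) pos = pos ∧ ∀ p ∈ l, ¬(p.1 ∈ u ∧ p.2 ∈ u ∧ pos p.2 < pos p.1)) ∨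
        Vf pairs u.toFinset (l.foldl (stepP u) pos) < Vf pairs u.toFinset pos) := by
  intro l
  induction l with
  | nil => exact fun _ pos hinj => ⟨hinj, Or.inl ⟨rfl, by simp⟩⟩
  | cons q l ih =>
      intro hl pos hinj
      rw [List.foldl_cons]
      by_cases hg : q.1 ∈ u ∧ q.2 ∈ u ∧ pos q.2 < pos q.1
      · have hstep : stepP u pos q =
            fun x => if x = q.1 then pos q.2 else if x = q.2 then pos q.1 else pos x := by
          rw [stepP, if_pos hg]
        have hq1 : q.1 ∈ u.toFinset := List.mem_toFinset.mpr hg.1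
        have hq2 : q.2 ∈ u.toFinset := List.mem_toFinset.mpr hg.2.1
        have hdec := swap_dec pairs u.toFinset pos q.1 q.2 hto htr hq1 hq2
          (hl q (List.mem_cons_self)) hg.2.2
        have hinj1 : Set.InjOn (stepP u pos q) ↑u.toFinset := by
          rw [hstep]
          exact injOn_swap hinj (by exact_mod_cast hq1) (by exact_mod_cast hq2)
        obtain ⟨hinjN, hd⟩ := ih (fun p hp => hl p (List.mem_cons_of_mem _ hp)) (stepP u pos q) hinj1
        refine ⟨hinjN, Or.inr ?_⟩
        rcases hd with ⟨he, -⟩ | hlt2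
        · rw [he, hstep]
          exact hdec
        · calc Vf pairs u.toFinset (l.foldl (stepP u) (stepP u pos q))
              < Vf pairs u.toFinset (stepP u pos q) := hlt2
            _ < Vf pairs u.toFinset pos := by rw [hstep]; exact hdec
      · have hstep : stepP u pos q = pos := by rw [stepP, if_neg hg]
        rw [hstep]
        obtain ⟨hinjN, hd⟩ := ih (fun p hp => hl p (List.mem_cons_of_mem _ hp)) pos hinj
        refine ⟨hinjN, ?_⟩
        rcases hd with ⟨he, hall⟩ | hlt2
        · exact Or.inl ⟨he, fun p hp => by
            rcases List.mem_cons.mp hp with rfl | hp'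
            · exact hg
            · exact hall p hp'⟩
        · exact Or.inr hlt2

-- ---- dict fold realises the abstract fold ----

lemma swapFold_corr (u : List Int) :
    ∀ (l : List (Int × Int)) (d : PySem.Dict Int Int), d.keys = u →
      (l.foldl swapStep d).keys = u ∧
      ∀ x, (l.foldl swapStep d).getD x 0 = (l.foldl (stepP u) (fun y => d.getD y 0)) x := by
  intro l
  induction l with
  | nil => exact fun d hk => ⟨hk, fun x => rfl⟩
  | cons q l ih =>
      intro d hk
      have hcont : ∀ z, d.contains z = true ↔ z ∈ u := by
        intro z; rw [PySem.Dict.contains_iff_mem_keys, hk]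
      rw [List.foldl_cons, List.foldl_cons]
      by_cases hmem : q.1 ∈ u ∧ q.2 ∈ u
      · by_cases hcmp : d.getD q.2 0 < d.getD q.1 0
        · have hne : q.1 ≠ q.2 := by
            intro h; rw [h] at hcmp; exact lt_irrefl _ hcmp
          have hsw : swapStep d q = (d.insert q.1 (d.getD q.2 0)).insert q.2 (d.getD q.1 0) := by
            rw [swapStep, if_pos, if_pos]
            · exact hcmp
            · rw [Bool.and_eq_true, hcont, hcont]; exact hmem
          have hc1 : d.contains q.1 = true := (hcont q.1).mpr hmem.1
          have hc2' : (d.insert q.1 (d.getD q.2 0)).contains q.2 = true := by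
            rw [PySem.Dict.contains_insert, Bool.or_eq_true]
            exact Or.inr ((hcont q.2).mpr hmem.2)
          have hkeys' : (swapStep d q).keys = u := by
            rw [hsw, PySem.Dict.keys_insert_of_contains _ _ hc2',
              PySem.Dict.keys_insert_of_contains _ _ hc1, hk]
          have hfun : (fun y => (swapStep d q).getD y 0) =
              stepP u (fun y => d.getD y 0) q := by
            funext x
            rw [hsw, stepP, if_pos ⟨hmem.1, hmem.2, hcmp⟩]
            rw [PySem.Dict.getD_insert, PySem.Dict.getD_insert]
            by_cases hx2 : x = q.2
            · rw [if_pos hx2, if_neg (hx2 ▸ hne.symm : x ≠ q.1), if_pos hx2]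
            · rw [if_neg hx2]
              by_cases hx1 : x = q.1
              · rw [if_pos hx1, if_pos hx1]
              · rw [if_neg hx1, if_neg hx1, if_neg hx2]
          obtain ⟨hkN, hgN⟩ := ih (swapStep d q) hkeys'
          exact ⟨hkN, fun x => by rw [hgN x, hfun]⟩
        · have hsw : swapStep d q = d := by
            rw [swapStep, if_pos, if_neg]
            · exact fun h => hcmp h
            · rw [Bool.and_eq_true, hcont, hcont]; exact hmem
          have hfun : stepP u (fun y => d.getD y 0) q = (fun y => d.getD y 0) := by
            rw [stepP, if_neg]
            rintro ⟨-, -, h3⟩; exact hcmp h3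
          rw [hsw, hfun]
          exact ih d hk
      · have hsw : swapStep d q = d := by
          rw [swapStep, if_neg]
          rw [Bool.and_eq_true, hcont, hcont]
          exact hmem
        have hfun : stepP u (fun y => d.getD y 0) q = (fun y => d.getD y 0) := by
          rw [stepP, if_neg]
          rintro ⟨h1, h2, -⟩; exact hmem ⟨h1, h2⟩
        rw [hsw, hfun]
        exact ih d hk

-- ---- one pass strictly decreases the measure ----

lemma sortPass_eq (u : List Int) (pairs : List (Int × Int)) :
    sortPass u pairs =
      PySem.List.sorted u (fun x => ((pairs.foldl swapStep (initOrder u)).getD x 0)) false := rfl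

lemma sortPass_perm (u : List Int) (pairs : List (Int × Int)) : (sortPass u pairs).Perm u := by
  rw [sortPass_eq]
  exact PySem.List.sorted_perm _ _ _

lemma sorted_pairwise_lt {v : List Int} {key : Int → Int} (hnd : v.Nodup)
    (hinj : Set.InjOn key ↑v.toFinset) :
    (PySem.List.sorted v key false).Pairwise (fun a b => key a < key b) := by
  have hp := PySem.List.sorted_pairwise v key
  have hnd' : (PySem.List.sorted v key false).Nodup :=
    (PySem.List.sorted_perm (xs := v) (key := key) (rev := false)).symm.nodup hnd
  refine List.Pairwise.imp_of_mem ?_ (hp.and hnd')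
  rintro a b ha hb ⟨hle, hne⟩
  have ha' : a ∈ v.toFinset := List.mem_toFinset.mpr ((PySem.List.sorted_perm v key false).mem_iff.mp ha)
  have hb' : b ∈ v.toFinset := List.mem_toFinset.mpr ((PySem.List.sorted_perm v key false).mem_iff.mp hb)
  exact lt_of_le_of_ne hle (fun he => hne (hinj ha' hb' he))

lemma orderIff {v : List Int} {pos1 pos2 : Int → Int}
    (h1 : v.Pairwise (fun a b => pos1 a < pos1 b))
    (h2 : v.Pairwise (fun a b => pos2 a < pos2 b)) :
    ∀ x ∈ v.toFinset, ∀ y ∈ v.toFinset, (pos1 x < pos1 y ↔ pos2 x < pos2 y) := by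
  have hsym : Symmetric (fun a b : Int =>
      (pos1 a < pos1 b ↔ pos2 a < pos2 b) ∧ (pos1 b < pos1 a ↔ pos2 b < pos2 a)) :=
    fun a b hab => ⟨hab.2, hab.1⟩
  have hcomb : v.Pairwise (fun a b =>
      (pos1 a < pos1 b ↔ pos2 a < pos2 b) ∧ (pos1 b < pos1 a ↔ pos2 b < pos2 a)) :=
    (h1.and h2).imp (fun {a b} h => by
      obtain ⟨ha, hb⟩ := h
      exact ⟨iff_of_true ha hb, iff_of_false (by omega) (by omega)⟩)
  intro x hx y hy
  by_cases hxy : x = y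
  · subst hxy; exact iff_of_false (lt_irrefl _) (lt_irrefl _)
  · exact (List.Pairwise.forall hsym hcomb (List.mem_toFinset.mp hx)
      (List.mem_toFinset.mp hy) hxy).1

lemma sortPass_dec (u : List Int) (pairs : List (Int × Int)) (hax : OrdAx u pairs)
    (hinv : ¬ NoViol pairs u) : M pairs (sortPass u pairs) < M pairs u := by
  obtain ⟨hnd, hirr, hto, htr⟩ := hax
  have hto' : ∀ x ∈ u.toFinset, ∀ y ∈ u.toFinset, x ≠ y → ((x, y) ∈ pairs ↔ (y, x) ∉ pairs) :=
    fun x hx y hy => hto x (List.mem_toFinset.mp hx) y (List.mem_toFinset.mp hy)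
  have htr' : ∀ x ∈ u.toFinset, ∀ y ∈ u.toFinset, ∀ z ∈ u.toFinset,
      (x, y) ∈ pairs → (y, z) ∈ pairs → (x, z) ∈ pairs :=
    fun x hx y hy z hz => htr x (List.mem_toFinset.mp hx) y (List.mem_toFinset.mp hy)
      z (List.mem_toFinset.mp hz)
  set pos0 := fun x => (initOrder u).getD x 0 with hpos0
  have hpw0 : u.Pairwise (fun a b => pos0 a < pos0 b) := initOrder_pairwise u hnd
  have hinj0 : Set.InjOn pos0 ↑u.toFinset := injOn_of_pairwise_lt hpw0
  obtain ⟨hkeysN, hgdN⟩ := swapFold_corr u pairs (initOrder u) (initOrder_keys u hnd)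
  set posN := pairs.foldl (stepP u) pos0 with hposN
  have hdict : (fun x => ((pairs.foldl swapStep (initOrder u)).getD x 0)) = posN :=
    funext (fun x => hgdN x)
  obtain ⟨hinjN, hdisj⟩ := foldP_dec u pairs hto' htr' pairs (fun p hp => hp) pos0 hinj0
  have hfires : ∃ p ∈ pairs, p.1 ∈ u ∧ p.2 ∈ u ∧ pos0 p.2 < pos0 p.1 := by
    by_contra hno
    apply hinv
    unfold NoViol
    rw [List.pairwise_iff_getElem]
    intro i j hi hj hij hmem
    apply hno
    refine ⟨(u[j], u[i]), hmem, List.getElem_mem _, List.getElem_mem _, ?_⟩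
    show pos0 u[i] < pos0 u[j]
    rw [hpos0]
    simp only
    rw [initOrder_getD u hnd i hi, initOrder_getD u hnd j hj]
    exact_mod_cast hij
  have hVstrict : Vf pairs u.toFinset posN < Vf pairs u.toFinset pos0 := by
    rcases hdisj with ⟨heq, hall⟩ | h
    · obtain ⟨p, hp, h1, h2, h3⟩ := hfires
      exact absurd ⟨h1, h2, h3⟩ (hall p hp)
    · exact h
  have hsp : sortPass u pairs = PySem.List.sorted u posN false := by
    rw [sortPass_eq, hdict]
  rw [hsp]
  set w := PySem.List.sorted u posN false with hw
  have hwperm : w.Perm u := PySem.List.sorted_perm _ _ _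
  have hwnd : w.Nodup := hwperm.symm.nodup hnd
  have hpwN : w.Pairwise (fun a b => posN a < posN b) := sorted_pairwise_lt hnd hinjN
  have hpw0' : w.Pairwise (fun a b => (initOrder w).getD a 0 < (initOrder w).getD b 0) :=
    initOrder_pairwise w hwnd
  have htf : w.toFinset = u.toFinset := List.toFinset_eq_of_perm w u hwperm
  unfold M
  rw [htf]
  rw [Vf_congr (pairs := pairs) (E := u.toFinset)
    (pos1 := fun x => (initOrder w).getD x 0) (pos2 := posN) ?_]
  · exact hVstrict
  · rw [← htf]
    exact orderIff hpw0' hpwN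

lemma countP_card {l : List Int} (p : Int → Bool) (h : l.Nodup) :
    l.countP p = (l.toFinset.filter (fun x => p x)).card := by
  rw [← List.toFinset_filter, List.card_toFinset, List.Nodup.dedup (h.filter p),
    List.countP_eq_length_filter]

lemma containsOf (pairs : List (Int × Int)) (q : Int × Int) :
    (PySem.Set.ofList pairs).contains q = true ↔ q ∈ pairs := by
  rw [PySem.Set.contains]
  simp [PySem.Set.mem_ofList]

lemma M_bound (pairs : List (Int × Int)) (u : List Int) : M pairs u ≤ u.length * u.length := by
  calc M pairs u ≤ u.toFinset.card * u.toFinset.card := Vf_le _ _ _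
    _ ≤ u.length * u.length := Nat.mul_le_mul (List.toFinset_card_le u) (List.toFinset_card_le u)

-- ---- the loop terminates in a valid permutation ----

lemma loop_spec (pairs : List (Int × Int)) :
    ∀ (fuel : Nat) (v : List Int), OrdAx v pairs → M pairs v < fuel →
      (customSortLoop pairs fuel v).Perm v ∧ NoViol pairs (customSortLoop pairs fuel v) := by
  intro fuel
  induction fuel with
  | zero => intro v _ hM; omega
  | succ fuel ih =>
      intro v hax hM
      by_cases hc : checkUpdateOrder v pairs = true
      · simp only [customSortLoop, hc, if_true]
        exact ⟨List.Perm.refl v, (checkUpdateOrder_iff v pairs).mp hc⟩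
      · have hinv : ¬ NoViol pairs v := fun h => hc ((checkUpdateOrder_iff v pairs).mpr h)
        have hdec := sortPass_dec v pairs hax hinv
        have haxp : OrdAx (sortPass v pairs) pairs := OrdAx_perm hax (sortPass_perm v pairs)
        obtain ⟨hperm, hval⟩ := ih (sortPass v pairs) haxp (by omega)
        simp only [customSortLoop, hc, Bool.false_eq_true, if_false]
        exact ⟨hperm.trans (sortPass_perm v pairs), hval⟩

-- ---- uniqueness of the valid arrangement ----

lemma valid_unique (pairs : List (Int × Int)) :
    ∀ (v w : List Int), v.Perm w → v.Nodup →
      (∀ x ∈ v, ∀ y ∈ v, x ≠ y → ((x, y) ∈ pairs ↔ (y, x) ∉ pairs)) →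
      NoViol pairs v → NoViol pairs w → v = w := by
  intro v
  induction v with
  | nil =>
      intro w hperm _ _ _ _
      exact hperm.nil_eq
  | cons a t ih =>
      intro w hperm hnd hto hv hw
      unfold NoViol at hv hw
      cases w with
      | nil =>
          have := hperm.eq_nil
          simp at this
      | cons b s =>
          by_cases hab : a = b
          · subst hab
            have hperm' : t.Perm s := hperm.cons_inv
            have heq := ih s hperm' hnd.of_cons
              (fun x hx y hy => hto x (List.mem_cons_of_mem a hx) y (List.mem_cons_of_mem a hy))
              hv.of_cons hw.of_cons
            rw [heq]
          · exfalso
            have hbv : b ∈ t := by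
              have hmem : b ∈ a :: t := hperm.mem_iff.mpr (List.mem_cons_self ..)
              rcases List.mem_cons.mp hmem with h | h
              · exact absurd h.symm hab
              · exact h
            have hav : a ∈ s := by
              have hmem : a ∈ b :: s := hperm.mem_iff.mp (List.mem_cons_self ..)
              rcases List.mem_cons.mp hmem with h | h
              · exact absurd h hab
              · exact h
            have h1 : (b, a) ∉ pairs := (List.pairwise_cons.mp hv).1 b hbv
            have h2 : (a, b) ∉ pairs := (List.pairwise_cons.mp hw).1 a hav
            have hiff := hto a (List.mem_cons_self ..) b (List.mem_cons.mpr (Or.inr hbv)) hab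
            exact h2 (hiff.mpr h1)

-- ---- B's sort is a valid arrangement ----

lemma altKey_count (u : List Int) (ps : PySem.Set (Int × Int)) (x : Int) :
    altKey u ps x = (u.countP (fun y => ps.contains (y, x)) : Int) := by
  unfold altKey
  rw [PySem.List.foldl_if_add_one]
  ring

lemma altSorted_valid (u : List Int) (pairs : List (Int × Int)) (hax : OrdAx u pairs) :
    NoViol pairs (PySem.List.sorted u (altKey u (PySem.Set.ofList pairs)) false) := by
  obtain ⟨hnd, hirr, hto, htr⟩ := hax
  set ps := PySem.Set.ofList pairs with hps
  set w := PySem.List.sorted u (altKey u ps) false with hw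
  have hwperm : w.Perm u := PySem.List.sorted_perm _ _ _
  have hwnd : w.Nodup := hwperm.symm.nodup hnd
  have hmono : ∀ a ∈ u, ∀ b ∈ u, (b, a) ∈ pairs → altKey u ps b < altKey u ps a := by
    intro a ha b hb hba
    rw [altKey_count, altKey_count]
    have hcount : u.countP (fun y => ps.contains (y, b)) <
        u.countP (fun y => ps.contains (y, a)) := by
      rw [countP_card _ hnd, countP_card _ hnd]
      apply Finset.card_lt_card
      have hsub : u.toFinset.filter (fun y => ps.contains (y, b)) ⊆
          u.toFinset.filter (fun y => ps.contains (y, a)) := by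
        intro y hy
        rw [Finset.mem_filter] at hy ⊢
        refine ⟨hy.1, ?_⟩
        rw [hps, containsOf] at hy ⊢
        exact htr y (List.mem_toFinset.mp hy.1) b hb a ha hy.2 hba
      rw [Finset.ssubset_iff_of_subset hsub]
      refine ⟨b, ?_, ?_⟩
      · rw [Finset.mem_filter, hps, containsOf]
        exact ⟨List.mem_toFinset.mpr hb, hba⟩
      · rw [Finset.mem_filter, hps, containsOf]
        rintro ⟨-, hbb⟩
        exact hirr b hb hbb
    exact_mod_cast hcount
  have hp := PySem.List.sorted_pairwise u (altKey u ps)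
  unfold NoViol
  refine List.Pairwise.imp_of_mem ?_ (hp.and hwnd)
  rintro a b ha hb ⟨hle, hne⟩ hcon
  have ha' : a ∈ u := hwperm.mem_iff.mp ha
  have hb' : b ∈ u := hwperm.mem_iff.mp hb
  have := hmono a ha' b hb' hcon
  omega

-- ---- the two fixed results coincide ----

lemma fix_eq (u : List Int) (pairs : List (Int × Int)) (hax : OrdAx u pairs) :
    customSort u pairs = PySem.List.sorted u (altKey u (PySem.Set.ofList pairs)) false := by
  have hM : M pairs u < u.length * u.length + 1 := Nat.lt_succ_of_le (M_bound pairs u)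
  obtain ⟨hperm, hval⟩ := loop_spec pairs (u.length * u.length + 1) u hax hM
  obtain ⟨hnd, hirr, hto, htr⟩ := hax
  unfold customSort
  set r := customSortLoop pairs (u.length * u.length + 1) u with hr
  set w := PySem.List.sorted u (altKey u (PySem.Set.ofList pairs)) false with hw
  have hwperm : w.Perm u := PySem.List.sorted_perm _ _ _
  have hwval : NoViol pairs w := altSorted_valid u pairs ⟨hnd, hirr, hto, htr⟩
  exact valid_unique pairs r w (hperm.trans hwperm.symm) (hperm.symm.nodup hnd)
    (fun x hx y hy => hto x (hperm.mem_iff.mp hx) y (hperm.mem_iff.mp hy)) hval hwval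

-- ===== VERDICT (by name: the statement is the Claim_ definition above) =====
theorem evaluateUpdates_spec : Claim_equal_evaluateUpdates := by
  intro updates pairs _ hpre
  unfold Spec_evaluateUpdates evaluateUpdates evaluateUpdates_alt
  apply PySem.List.foldl_congr_mem
  intro acc u hu
  obtain ⟨hne, hax'⟩ := hpre u hu
  rw [check_eq_altValid u pairs]
  by_cases hv : altValid u (PySem.Set.ofList pairs) = true
  · simp [hv]
  · have hinv : ¬ NoViol pairs u := fun h => hv ((altValid_iff u pairs).mpr h)
    have hax : OrdAx u pairs := hax' (fun h => hinv ((noViol_getElem pairs u).mpr h))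
    simp only [Bool.not_eq_true] at hv
    simp only [hv, if_false, Bool.false_eq_true]
    have : fixPageOrder u pairs =
        PySem.List.pyGetD (PySem.List.sorted u (altKey u (PySem.Set.ofList pairs)) false)
          (PySem.Int.floordiv (PySem.List.len (PySem.List.sorted u (altKey u (PySem.Set.ofList pairs)) false)) 2) 0 := by
      unfold fixPageOrder
      rw [fix_eq u pairs hax]
    rw [this]
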